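-- pv_equiv track=rewrite | github.com/sun-hainan/Python | 外部内存算法/list_labeling.py | verify_labeling
-- ===== SOURCE A (Python) =====
-- from typing import List
--
-- def verify_labeling(labels: List[int]) -> bool:
--
--     """
--
--     验证标签有效性
--
--
--
--     返回：是否有效
--
--     """
--
--     n = len(labels)
--
--
--
--     # 检查范围
--
--     for label in labels:
--
--         if label < 1 or label > n:
--
--             return False
--
--
--
--     # 检查唯一性
--
--     if len(set(labels)) != n:
--
--         return False
--
--
--
--     # 检查顺序性
--
--     for i in range(n - 1):
--
--         if labels[i] >= labels[i + 1]:
--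
--             return False
--
--
--
--     return True
-- ===== SOURCE B (Python) =====
-- from typing import List
--
-- def verify_labeling(labels: List[int]) -> bool:
--     return labels == list(range(1, len(labels) + 1))
-- ===== Notes on version B (the rewrite author's own statement) =====
-- stated objective: simpler
-- what changed: Replaces A's three passes (range check, set-based uniqueness check, adjacent-order loop) with a single closed-form comparison against list(range(1, n+1)), valid because a strictly increasing list of n values in [1,n] must be exactly [1..n].
import Mathlib
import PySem

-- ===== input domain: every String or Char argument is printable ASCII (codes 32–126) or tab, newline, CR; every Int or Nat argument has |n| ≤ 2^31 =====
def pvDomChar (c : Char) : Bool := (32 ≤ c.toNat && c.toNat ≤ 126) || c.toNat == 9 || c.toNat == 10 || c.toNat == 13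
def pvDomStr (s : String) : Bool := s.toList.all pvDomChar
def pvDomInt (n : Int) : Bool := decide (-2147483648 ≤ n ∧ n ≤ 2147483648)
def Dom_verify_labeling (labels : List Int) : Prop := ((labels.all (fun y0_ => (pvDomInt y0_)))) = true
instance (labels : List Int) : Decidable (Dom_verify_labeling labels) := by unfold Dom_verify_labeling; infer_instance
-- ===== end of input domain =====

-- B replaces A's three passes (range check, set-uniqueness check, adjacent-order loop)
-- with a single closed-form comparison against list(range(1, n+1)): simpler, same cost.


-- ===== PORT A =====
def verify_labeling (labels : List Int) : Bool :=
  -- n = len(labels)   (inlined below as (labels.length : Int))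
  -- for label in labels: if label < 1 or label > n: return False
  if labels.any (fun label => decide (label < 1) || decide (label > (labels.length : Int))) then false
  -- if len(set(labels)) != n: return False
  else if (PySem.Set.ofList labels).length ≠ labels.length then false
  -- for i in range(n - 1): if labels[i] >= labels[i + 1]: return False
  else if (PySem.List.pyRange 0 ((labels.length : Int) - 1) 1).any (fun i =>
      decide (PySem.List.pyGetD labels i 0 ≥ PySem.List.pyGetD labels (i + 1) 0)) then false
  else true

-- ===== PORT B =====
def verify_labeling_alt (labels : List Int) : Bool :=
  labels == PySem.List.pyRange 1 ((labels.length : Int) + 1) 1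

-- ===== PRECONDITION & SPEC =====
def Spec_verify_labeling (labels : List Int) (out : Bool) : Prop := out = verify_labeling_alt labels
instance (labels : List Int) (out : Bool) : Decidable (Spec_verify_labeling labels out) := by unfold Spec_verify_labeling; infer_instance

-- ===== CLAIM (what is proved, stated in full; the proofs are below) =====
def Claim_equal_verify_labeling : Prop := ∀ (labels : List Int), Dom_verify_labeling labels → Spec_verify_labeling labels (verify_labeling labels)

-- ===== LEMMAS AND PROOFS =====

-- adjacent strict increase gives full pairwise strict increase
lemma pairwise_of_adj (l : List Int)
    (h : ∀ i, (hh : i + 1 < l.length) → l[i] < l[i + 1]) : l.Pairwise (· < ·) := by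
  rw [List.pairwise_iff_getElem]
  have key : ∀ j, (hj : j < l.length) → ∀ i, (hi : i < l.length) → i < j → l[i] < l[j] := by
    intro j
    induction j with
    | zero => intro _ _ _ h'; omega
    | succ k ih =>
      intro hj i hi hij
      rcases Nat.lt_or_ge i k with h' | h'
      · exact lt_trans (ih (by omega) i hi h') (h k (by omega))
      · have hik : i = k := by omega
        subst hik
        exact h i (by omega)
  intro i j hi hj hij
  exact key j hj i hi hij

-- a nonempty strictly increasing list of ints inside [a,b] has at most b-a+1 elements
lemma pairwise_count (l : List Int) (a b : Int) (hp : l.Pairwise (· < ·))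
    (hb : ∀ x ∈ l, a ≤ x ∧ x ≤ b) (hne : l ≠ []) : (l.length : Int) ≤ b - a + 1 := by
  induction l generalizing a with
  | nil => simp at hne
  | cons x xs ih =>
    have hx := hb x (by simp)
    have hpc := List.pairwise_cons.mp hp
    by_cases hxs : xs = []
    · subst hxs; simp; omega
    · have hrec : (xs.length : Int) ≤ b - (x + 1) + 1 :=
        ih (x + 1) hpc.2
          (fun y hy => ⟨by have := hpc.1 y hy; omega, (hb y (by simp [hy])).2⟩) hxs
      simp only [List.length_cons]
      push_cast
      omega

-- a strictly increasing list whose elements lie in [a, a + len - 1] is exactly pyRange a (a+len) 1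
lemma eq_pyRange_of_pairwise (l : List Int) : ∀ a : Int, l.Pairwise (· < ·) →
    (∀ x ∈ l, a ≤ x ∧ x ≤ a + l.length - 1) →
    l = PySem.List.pyRange a (a + l.length) 1 := by
  induction l with
  | nil => intro a _ _; simp
  | cons x xs ih =>
    intro a hp hb
    have hpc := List.pairwise_cons.mp hp
    have hxa : a ≤ x := (hb x (by simp)).1
    have hxle : x ≤ a := by
      have hcount := pairwise_count (x :: xs) x (a + (x :: xs).length - 1) hp
        (fun y hy => by
          rcases List.mem_cons.mp hy with hy' | hy'
          · subst hy'; exact ⟨le_refl _, (hb y hy).2⟩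
          · exact ⟨le_of_lt (hpc.1 y hy'), (hb y hy).2⟩)
        (by simp)
      simp only [List.length_cons] at hcount ⊢
      push_cast at hcount
      omega
    have hxeq : x = a := le_antisymm hxle hxa
    subst hxeq
    have hxs : xs = PySem.List.pyRange (x + 1) ((x + 1) + xs.length) 1 :=
      ih (x + 1) hpc.2
        (fun y hy => by
          refine ⟨by have := hpc.1 y hy; omega, ?_⟩
          have := (hb y (by simp [hy])).2
          simp only [List.length_cons] at this
          push_cast at this ⊢
          omega)
    have hbnd : x + ((x :: xs).length : Int) = (x + 1) + (xs.length : Int) := by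
      simp only [List.length_cons]; push_cast; ring
    rw [hbnd, PySem.List.pyRange_one_cons (by omega)]
    exact congrArg (x :: ·) hxs

lemma A_eq_B (l : List Int) : verify_labeling l = verify_labeling_alt l := by
  rw [Bool.eq_iff_iff]
  unfold verify_labeling verify_labeling_alt
  rw [beq_iff_eq]
  constructor
  · intro hA
    split_ifs at hA with h1 h2 h3
    all_goals try simp at hA
    -- bounds
    have hbound : ∀ x ∈ l, 1 ≤ x ∧ x ≤ (l.length : Int) := by
      intro x hx
      by_contra hc
      exact h1 (List.any_eq_true.mpr ⟨x, hx, by push Not at hc; simp; omega⟩)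
    -- adjacency
    have hadj : ∀ i, (hh : i + 1 < l.length) → l[i] < l[i + 1] := by
      intro i hh
      by_contra hc
      push Not at hc
      apply h3
      refine List.any_eq_true.mpr ⟨(i : Int), ?_, ?_⟩
      · rw [PySem.List.mem_pyRange_one]; omega
      · have e1 : PySem.List.pyGetD l (i : Int) 0 = l[i] := by
          rw [PySem.List.pyGetD_natCast, List.getD_eq_getElem l 0 (by omega)]
        have e2 : PySem.List.pyGetD l ((i : Int) + 1) 0 = l[i + 1] := by
          have : ((i : Int) + 1) = ((i + 1 : Nat) : Int) := by push_cast; ring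
          rw [this, PySem.List.pyGetD_natCast, List.getD_eq_getElem l 0 (by omega)]
        simp [e1, e2]
        omega
    have := eq_pyRange_of_pairwise l 1 (pairwise_of_adj l hadj)
      (fun x hx => by have := hbound x hx; omega)
    rw [show ((l.length : Int) + 1) = 1 + (l.length : Int) from by ring]
    exact this
  · intro hB
    split_ifs with h1 h2 h3
    · -- range check cannot fire
      exfalso
      rcases List.any_eq_true.mp h1 with ⟨x, hx, hxf⟩
      rw [hB, PySem.List.mem_pyRange_one] at hx
      simp at hxf
      omega
    · -- uniqueness check cannot fire
      exfalso
      apply h2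
      have hnd : l.Nodup := by
        rw [hB]; exact PySem.List.nodup_pyRange_one 1 ((l.length : Int) + 1)
      exact congrArg List.length (PySem.Set.ofList_eq_self_of_nodup l hnd)
    · -- order check cannot fire
      exfalso
      rcases List.any_eq_true.mp h3 with ⟨i, hi, hif⟩
      rw [PySem.List.mem_pyRange_one] at hi
      have hi0 : 0 ≤ i := hi.1
      have hi1 : i < (l.length : Int) - 1 := hi.2
      have hlt1 : i < (l.length : Int) := by omega
      have hlt2 : i + 1 < (l.length : Int) := by omega
      rw [PySem.List.pyGetD_eq_getElem l 0 hi0 hlt1,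
          PySem.List.pyGetD_eq_getElem l 0 (by omega) hlt2] at hif
      have q1 : l[i.toNat]? = some (1 + (i.toNat : Int)) := by
        rw [hB, PySem.List.getElem?_pyRange_one]
        rw [if_pos (by omega)]
      have q2 : l[(i + 1).toNat]? = some (1 + ((i + 1).toNat : Int)) := by
        rw [hB, PySem.List.getElem?_pyRange_one]
        rw [if_pos (by omega)]
      have g1 : l[i.toNat]'(by omega) = 1 + (i.toNat : Int) := by
        have h' := List.getElem?_eq_getElem (l := l) (i := i.toNat) (by omega)
        rw [q1] at h'
        exact (Option.some.inj h').symm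
      have g2 : l[(i + 1).toNat]'(by omega) = 1 + ((i + 1).toNat : Int) := by
        have h' := List.getElem?_eq_getElem (l := l) (i := (i + 1).toNat) (by omega)
        rw [q2] at h'
        exact (Option.some.inj h').symm
      rw [g1, g2] at hif
      simp at hif
      omega
    · rfl

-- ===== VERDICT (by name: the statement is the Claim_ definition above) =====
theorem verify_labeling_spec : Claim_equal_verify_labeling := by
  intro labels _
  unfold Spec_verify_labeling
  exact A_eq_B labels
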